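-- pv_equiv track=rewrite | github.com/HEMANTHKUMARMARISETTI/python | contains_a_2_next_to_ 2.py | check_22
-- ===== SOURCE A (Python) =====
-- def check_22(num_list):
--     new_str=" "
--     for i in range(len(num_list)):
--        new_str=new_str+str(num_list[i])
--
--     if '22' in new_str:
--        return True
--     else:
--        return False
-- ===== SOURCE B (Python) =====
-- def check_22(num_list):
--     last = ''
--     for n in num_list:
--         s = str(n)
--         if '22' in s:
--             return True
--         if last == '2' and s[0] == '2':
--             return True
--         last = s[-1]
--     return False
-- ===== Notes on version B (the rewrite author's own statement) =====
-- stated objective: alternative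
-- what changed: Instead of concatenating all numbers into one big string and then searching it for '22', B streams over the list once, remembering only the last character seen, detecting '22' inside an element or across an element boundary with early exit.
import Mathlib
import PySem

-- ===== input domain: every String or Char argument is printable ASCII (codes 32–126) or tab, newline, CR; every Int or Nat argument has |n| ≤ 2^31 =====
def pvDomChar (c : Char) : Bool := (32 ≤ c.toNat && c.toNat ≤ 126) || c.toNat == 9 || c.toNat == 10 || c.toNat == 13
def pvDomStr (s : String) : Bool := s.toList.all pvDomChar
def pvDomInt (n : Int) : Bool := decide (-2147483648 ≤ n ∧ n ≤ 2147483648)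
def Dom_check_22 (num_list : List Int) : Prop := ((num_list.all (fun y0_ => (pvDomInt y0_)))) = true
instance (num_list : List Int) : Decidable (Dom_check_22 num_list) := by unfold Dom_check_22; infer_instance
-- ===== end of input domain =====

-- B replaces concatenate-then-search by a single streaming pass that remembers only the
-- last character seen, with early exit (objective: alternative; avoids building the big string).

-- ===== PORT A =====
-- A: new_str = " "; for i in range(len(num_list)): new_str += str(num_list[i]); then '22' in new_str
def check_22 (num_list : List Int) : Bool :=
  let new_str :=
    (PySem.List.pyRange 0 (num_list.length : Int) 1).foldl
      (fun acc i => acc ++ PySem.Int.toChars (PySem.List.pyGetD num_list i 0)) [' ']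
  if PySem.Chars.isIn ['2', '2'] new_str then true else false

-- ===== PORT B =====
-- streaming loop: `last` is the last character seen so far (none before any character)
def check22Go (last : Option Char) (l : List Int) : Bool :=
  match l with
  | [] => false
  | n :: rest =>
    let s := PySem.Int.toChars n
    if PySem.Chars.isIn ['2', '2'] s then true
    else if last == some '2' && s.head? == some '2' then true
    else check22Go s.getLast? rest

def check_22_alt (num_list : List Int) : Bool :=
  check22Go none num_list

-- ===== PRECONDITION & SPEC =====
def Spec_check_22 (num_list : List Int) (out : Bool) : Prop := out = check_22_alt num_list
instance (num_list : List Int) (out : Bool) : Decidable (Spec_check_22 num_list out) := by unfold Spec_check_22; infer_instance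

-- ===== CLAIM (what is proved, stated in full; the proofs are below) =====
def Claim_equal_check_22 : Prop := ∀ (num_list : List Int), Dom_check_22 num_list → Spec_check_22 num_list (check_22 num_list)

-- ===== LEMMAS AND PROOFS =====

theorem toDigitsCore_length_mono (b : Nat) : ∀ (f n : Nat) (acc : List Char),
    acc.length ≤ (Nat.toDigitsCore b f n acc).length := by
  intro f
  induction f with
  | zero => intro n acc; simp [Nat.toDigitsCore]
  | succ f ih =>
    intro n acc
    simp only [Nat.toDigitsCore]
    split
    · simp
    · calc acc.length ≤ (Nat.digitChar (n % b) :: acc).length := by simp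
        _ ≤ _ := ih _ _

theorem toDigits_ne_nil (b n : Nat) : Nat.toDigits b n ≠ [] := by
  have h : (Nat.toDigits b n).length ≠ 0 := by
    have h1 : ([] : List Char).length + 1 ≤ (Nat.toDigitsCore b (n+1) n []).length := by
      simp only [Nat.toDigitsCore]
      split
      · simp
      · calc ([] : List Char).length + 1 = (Nat.digitChar (n % b) :: []).length := by simp
          _ ≤ _ := toDigitsCore_length_mono b _ _ _
    simp only [Nat.toDigits]
    simp at h1; omega
  exact fun he => h (by simp [he])

theorem toChars_ne_nil (n : Int) : PySem.Int.toChars n ≠ [] := by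
  simp only [PySem.Int.toChars]
  split
  · simp
  · exact toDigits_ne_nil 10 _

-- where a two-character pattern sits inside a concatenation
theorem infix_pair_append (x y : Char) (a b : List Char) :
    ([x, y] <:+: (a ++ b)) ↔
      ([x, y] <:+: a) ∨ ([x, y] <:+: b) ∨ (a.getLast? = some x ∧ b.head? = some y) := by
  induction a with
  | nil =>
    constructor
    · intro h; exact Or.inr (Or.inl (by simpa using h))
    · rintro (h | h | ⟨h, _⟩)
      · exact absurd h.length_le (by simp)
      · simpa using h
      · simp at h
  | cons c a ih =>
    rw [List.cons_append, List.infix_cons_iff, ih, List.infix_cons_iff]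
    constructor
    · rintro (hp | h | h | h)
      · -- [x,y] prefix of c :: (a ++ b)
        rcases hp with ⟨t, ht⟩
        cases a with
        | nil =>
          cases b with
          | nil => simp at ht
          | cons d b' =>
            simp at ht
            exact Or.inr (Or.inr ⟨by simp [ht.1], by simp [ht.2.1]⟩)
        | cons d a' =>
          simp at ht
          exact Or.inl (Or.inl ⟨a', by simp [ht.1, ht.2.1]⟩)
      · exact Or.inl (Or.inr h)
      · exact Or.inr (Or.inl h)
      · rcases h with ⟨h1, h2⟩
        refine Or.inr (Or.inr ⟨?_, h2⟩)
        cases a with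
        | nil => simp at h1
        | cons d a' => simpa using h1
    · rintro ((hp | h) | h | ⟨h1, h2⟩)
      · rcases hp with ⟨t, ht⟩
        cases a with
        | nil => simp at ht
        | cons d a' =>
          simp at ht
          exact Or.inl ⟨a' ++ b, by simp [ht.1, ht.2.1]⟩
      · exact Or.inr (Or.inl h)
      · exact Or.inr (Or.inr (Or.inl h))
      · cases a with
        | nil =>
          simp at h1
          rcases b with _ | ⟨d, b'⟩
          · simp at h2
          · simp at h2
            exact Or.inl ⟨b', by simp [h1, h2]⟩
        | cons d a' =>
          refine Or.inr (Or.inr (Or.inr ⟨?_, h2⟩))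
          simpa using h1

theorem isIn_pair_append (x y : Char) (a b : List Char) :
    PySem.Chars.isIn [x, y] (a ++ b)
      = (PySem.Chars.isIn [x, y] a || PySem.Chars.isIn [x, y] b
          || (a.getLast? == some x && b.head? == some y)) := by
  by_cases h : [x, y] <:+: (a ++ b)
  · rw [(PySem.Chars.isIn_iff_infix _ _).2 h]
    rcases (infix_pair_append x y a b).1 h with h1 | h1 | ⟨h1, h2⟩
    · simp [(PySem.Chars.isIn_iff_infix _ _).2 h1]
    · simp [(PySem.Chars.isIn_iff_infix _ _).2 h1]
    · simp [h1, h2]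
  · rw [(PySem.Chars.isIn_eq_false_iff _ _).2 h]
    rw [infix_pair_append] at h
    push Not at h
    rw [(PySem.Chars.isIn_eq_false_iff _ _).2 h.1, (PySem.Chars.isIn_eq_false_iff _ _).2 h.2.1]
    have := h.2.2
    simp only [Bool.false_or]
    by_cases hx : a.getLast? = some x
    · simp [hx, this hx]
    · simp [hx]

-- the streaming loop only reads `last` through the test `last == '2'`
theorem check22Go_congr (l1 l2 : Option Char) (l : List Int)
    (h : (l1 == some '2') = (l2 == some '2')) : check22Go l1 l = check22Go l2 l := by
  cases l with
  | nil => rfl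
  | cons n rest => simp only [check22Go, h]

-- main invariant: searching '22' in the concatenation = found already, or the stream finds it
theorem check22_invariant : ∀ (l : List Int) (acc : List Char), acc ≠ [] →
    PySem.Chars.isIn ['2', '2']
        (l.foldl (fun a n => a ++ PySem.Int.toChars n) acc)
      = (PySem.Chars.isIn ['2', '2'] acc || check22Go acc.getLast? l) := by
  intro l
  induction l with
  | nil => intro acc _; simp [check22Go]
  | cons n rest ih =>
    intro acc hacc
    have hs : PySem.Int.toChars n ≠ [] := toChars_ne_nil n
    rw [List.foldl_cons, ih _ (by simp [hs]), List.getLast?_append_of_ne_nil _ hs,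
        isIn_pair_append]
    simp only [check22Go]
    by_cases h1 : PySem.Chars.isIn ['2', '2'] (PySem.Int.toChars n) = true
    · simp [h1]
    · simp only [Bool.not_eq_true] at h1
      simp only [h1, Bool.or_false]
      by_cases h2 : (acc.getLast? == some '2' && (PySem.Int.toChars n).head? == some '2') = true
      · simp [h2]
      · simp only [Bool.not_eq_true] at h2
        simp [h2]

-- ===== VERDICT (by name: the statement is the Claim_ definition above) =====
theorem check_22_spec : Claim_equal_check_22 := by
  intro num_list _
  unfold Spec_check_22 check_22 check_22_alt
  rw [PySem.List.foldl_pyRange_zero_pyGetD' num_list 0 (fun a n => a ++ PySem.Int.toChars n) [' ']]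
  show (if PySem.Chars.isIn ['2', '2'] (List.foldl (fun a n => a ++ PySem.Int.toChars n) [' '] num_list) = true then true else false) = _
  rw [check22_invariant num_list [' '] (by simp)]
  have h1 : PySem.Chars.isIn ['2', '2'] [' '] = false := by decide
  have h2 : check22Go (some ' ') num_list = check22Go none num_list :=
    check22Go_congr _ _ _ (by decide)
  simp [h1, h2]
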